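-- pv_equiv track=rewrite | github.com/stonehenge0/LLM_bias | code/agentic_communal_traditional_metric/prepare_voting_false_positives.py | get_local_context
-- ===== SOURCE A (Python) =====
-- def get_local_context(program_description_tokens, target_words, length_context_window=4):
--     """Get the local context of a list of target words in a given text.
--
--     Parameters:
--         program_description_tokens (list): A cleaned list of tokens (cleaned = no punctuations/whitespace)
--         target_words (list): the target word(s) to find the local context of
--         length_context_window (int): Size of context window. Default = 4
--
--     Returns:
--         full_context (list of tuples): Each entry in the list is one word and its local context.
--                                        First element of a tuple is the target word, second is its context.
--     """
--     # Ensure target_words is a list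
--     if isinstance(target_words, str):
--         target_words = [target_words]
--
--     full_context = []
--
--
--     for target_word in target_words:
--
--         positions = [i for i, word in enumerate(program_description_tokens) if word == target_word]
--
--         for pos in positions:
--             # Make sure start and end are within list bounds
--             start = max(0, pos - length_context_window)
--             end = min(len(program_description_tokens), pos + length_context_window + 1)
--
--
--             context = " ".join(program_description_tokens[start:end])
--
--             full_context.append((target_word, context))
--
--     return full_context
-- ===== SOURCE B (Python) =====
-- def get_local_context(program_description_tokens, target_words, length_context_window=4):
--     """Same result as A, by a different strategy: one pass over the tokens
--     precomputes every token's context string into a word -> contexts dict;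
--     each target is then a plain lookup (no per-target scan, no inner position
--     loop)."""
--     if isinstance(target_words, str):
--         target_words = [target_words]
--     n = len(program_description_tokens)
--     contexts_by_word = {}
--     for i, word in enumerate(program_description_tokens):
--         start = max(0, i - length_context_window)
--         end = min(n, i + length_context_window + 1)
--         contexts_by_word.setdefault(word, []).append(
--             " ".join(program_description_tokens[start:end]))
--     return [(t, c) for t in target_words for c in contexts_by_word.get(t, [])]
-- ===== Notes on version B (the rewrite author's own statement) =====
-- stated objective: alternative
-- what changed: B precomputes, in one pass over the tokens, each token's joined context string into a word->contexts dict, then emits each target's entries by lookup with a comprehension; A instead re-scans the whole token list per target and slices/joins per match inside a nested loop.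
import Mathlib
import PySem

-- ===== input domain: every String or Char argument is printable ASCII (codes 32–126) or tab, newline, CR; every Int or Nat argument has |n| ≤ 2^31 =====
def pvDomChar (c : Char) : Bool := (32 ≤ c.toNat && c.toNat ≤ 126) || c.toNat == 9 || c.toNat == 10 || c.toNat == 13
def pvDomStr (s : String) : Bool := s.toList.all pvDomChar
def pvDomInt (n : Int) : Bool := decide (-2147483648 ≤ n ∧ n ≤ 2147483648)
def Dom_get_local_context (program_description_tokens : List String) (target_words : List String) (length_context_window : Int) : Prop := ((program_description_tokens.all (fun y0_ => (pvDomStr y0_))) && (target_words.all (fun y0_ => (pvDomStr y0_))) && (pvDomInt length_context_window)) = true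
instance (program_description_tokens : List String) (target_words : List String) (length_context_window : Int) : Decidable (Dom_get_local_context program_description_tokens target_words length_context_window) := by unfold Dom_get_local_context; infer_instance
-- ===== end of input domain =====

-- B precomputes each token's context string into a word->contexts dict in one pass,
-- then each target is a lookup (objective: alternative algorithm, same output).

-- ===== PORT A =====
def get_local_context (program_description_tokens : List String) (target_words : List String) (length_context_window : Int) : List (String × String) :=
  target_words.foldl (fun full_context target_word =>
    let positions : List Int :=
      (PySem.List.enumerate program_description_tokens).foldl
        (fun ps p => if p.2 == target_word then ps ++ [p.1] else ps) []
    positions.foldl (fun fc pos =>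
      let start := max 0 (pos - length_context_window)
      let stop := min (program_description_tokens.length : Int) (pos + length_context_window + 1)
      fc ++ [(target_word, PySem.Str.join " " (PySem.List.slice program_description_tokens (some start) (some stop)))])
      full_context) []

-- ===== PORT B =====
-- B-side helper: the context string of the token at position pos ('" ".join(toks[start:end])').
def pvCtx (toks : List String) (w : Int) (pos : Int) : String :=
  PySem.Str.join " " (PySem.List.slice toks (some (max 0 (pos - w))) (some (min (toks.length : Int) (pos + w + 1))))

-- B-side helper: the one-pass word -> context-strings dict ('contexts_by_word').
def pvCtxDict (toks : List String) (w : Int) : PySem.Dict String (List String) :=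
  (PySem.List.enumerate toks).foldl
    (fun d p => d.modify p.2 [] (· ++ [pvCtx toks w p.1])) PySem.Dict.empty

def get_local_context_alt (program_description_tokens : List String) (target_words : List String) (length_context_window : Int) : List (String × String) :=
  let contexts_by_word := pvCtxDict program_description_tokens length_context_window
  target_words.flatMap (fun t => (contexts_by_word.getD t []).map (fun c => (t, c)))

-- ===== PRECONDITION & SPEC =====
def Spec_get_local_context (program_description_tokens : List String) (target_words : List String) (length_context_window : Int) (out : List (String × String)) : Prop := out = get_local_context_alt program_description_tokens target_words length_context_window
instance (program_description_tokens : List String) (target_words : List String) (length_context_window : Int) (out : List (String × String)) : Decidable (Spec_get_local_context program_description_tokens target_words length_context_window out) := by unfold Spec_get_local_context; infer_instance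

-- ===== CLAIM =====
def Claim_equal_get_local_context : Prop := ∀ (program_description_tokens : List String) (target_words : List String) (length_context_window : Int), Dom_get_local_context program_description_tokens target_words length_context_window → Spec_get_local_context program_description_tokens target_words length_context_window (get_local_context program_description_tokens target_words length_context_window)

-- ===== LEMMAS AND PROOFS =====

/-- Unrolled form of B's one-pass dict. -/
theorem getD_contexts_dict (l : List (Int × String)) (d : PySem.Dict String (List String))
    (f : Int → String) (t : String) :
    (l.foldl (fun d p => d.modify p.2 [] (· ++ [f p.1])) d).getD t []
      = d.getD t [] ++ ((l.filter (fun p => p.2 == t)).map (fun p => f p.1)) := by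
  induction l generalizing d with
  | nil => simp
  | cons p l ih =>
    rw [List.foldl_cons, ih, List.filter_cons]
    by_cases h : p.2 = t
    · simp [h]
    · simp [PySem.Dict.getD_modify, h, Ne.symm h]

/-- What B's dict answers for a word t: the contexts of exactly the positions
A's per-target scan would find, in order. -/
theorem getD_pvCtxDict (toks : List String) (w : Int) (t : String) :
    (pvCtxDict toks w).getD t []
      = ((PySem.List.enumerate toks).filter (fun p => p.2 == t)).map (fun p => pvCtx toks w p.1) := by
  unfold pvCtxDict
  rw [getD_contexts_dict]
  simp

theorem ports_agree (program_description_tokens : List String) (target_words : List String) (length_context_window : Int) :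
    get_local_context program_description_tokens target_words length_context_window
      = get_local_context_alt program_description_tokens target_words length_context_window := by
  unfold get_local_context get_local_context_alt
  dsimp only
  refine Eq.trans (PySem.List.foldl_congr_mem target_words _
      (fun fc t => fc ++
        ((pvCtxDict program_description_tokens length_context_window).getD t []).map (fun c => (t, c)))
      [] ?_) ?_
  · intro fc t _
    simp only [PySem.List.foldl_append_if, List.nil_append,
      PySem.List.foldl_append_singleton_eq_map, getD_pvCtxDict, List.map_map]
    rfl
  · rw [PySem.List.foldl_append_eq_flatMap, List.nil_append]

-- ===== VERDICT =====
theorem get_local_context_spec : Claim_equal_get_local_context := by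
  intro toks targets w _
  exact ports_agree toks targets w
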